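-- pv_equiv track=rewrite | github.com/kamilsoloducha/advent_of_code | 2023/task12.py | get_new_map
-- ===== SOURCE A (Python) =====
-- def get_new_map(current):
--     new_map = []
--     for i in range(0, 6):
--         for j in range(0, len(current)):
--             new_map.append(current[j])
--         if i != 5:
--             new_map.append('?')
--     return new_map
-- ===== SOURCE B (Python) =====
-- def get_new_map(current):
--     n = len(current)
--     return ['?' if p % (n + 1) == n else current[p % (n + 1)]
--             for p in range(6 * n + 5)]
-- ===== Notes on version B (the rewrite author's own statement) =====
-- stated objective: alternative
-- what changed: Replaces A's nested append loops with a closed-form index construction: one comprehension over range(6n+5) that decides each output position by modular arithmetic (position p is '?' iff p % (n+1) == n, else current[p % (n+1)]), so no concatenation or separator guard remains.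
import Mathlib
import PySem

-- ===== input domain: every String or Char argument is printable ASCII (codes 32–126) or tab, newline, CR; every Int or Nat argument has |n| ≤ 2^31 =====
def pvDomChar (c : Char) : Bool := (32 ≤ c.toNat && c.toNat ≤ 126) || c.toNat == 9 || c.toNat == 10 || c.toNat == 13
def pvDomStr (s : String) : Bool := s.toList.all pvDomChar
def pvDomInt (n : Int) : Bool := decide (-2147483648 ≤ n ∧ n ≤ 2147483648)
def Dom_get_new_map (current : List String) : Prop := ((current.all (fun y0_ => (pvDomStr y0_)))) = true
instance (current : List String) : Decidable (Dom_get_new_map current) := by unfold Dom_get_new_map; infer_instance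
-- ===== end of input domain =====

-- B replaces A's nested append loops and separator guard by a closed-form index construction: one map over range(6n+5) deciding each position by p % (n+1).
-- ===== PORT A =====
def get_new_map (current : List String) : List String :=
  (PySem.List.pyRange 0 6 1).foldl (fun new_map i =>
    let new_map :=
      (PySem.List.pyRange 0 (current.length : Int) 1).foldl
        (fun nm j => nm ++ [PySem.List.pyGetD current j ""]) new_map
    if i ≠ 5 then new_map ++ ["?"] else new_map) []

-- ===== PORT B =====
def get_new_map_alt (current : List String) : List String :=
  let n : Int := (current.length : Int)
  (PySem.List.pyRange 0 (6 * n + 5) 1).map (fun p =>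
    if PySem.Int.mod p (n + 1) = n then "?"
    else PySem.List.pyGetD current (PySem.Int.mod p (n + 1)) "")

-- ===== PRECONDITION & SPEC =====
def Spec_get_new_map (current : List String) (out : List String) : Prop := out = get_new_map_alt current
instance (current : List String) (out : List String) : Decidable (Spec_get_new_map current out) := by unfold Spec_get_new_map; infer_instance

-- ===== CLAIM (what is proved, stated in full; the proofs are below) =====
def Claim_equal_get_new_map : Prop := ∀ (current : List String), Dom_get_new_map current → Spec_get_new_map current (get_new_map current)

-- ===== LEMMAS AND PROOFS =====

theorem inner_loop_eq (current : List String) (init : List String) :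
    (PySem.List.pyRange 0 (current.length : Int) 1).foldl
      (fun nm j => nm ++ [PySem.List.pyGetD current j ""]) init = init ++ current := by
  rw [PySem.List.foldl_pyRange_zero_pyGetD' current "" (fun nm x => nm ++ [x]) init]
  induction current generalizing init with
  | nil => simp
  | cons x xs ih => simp [List.foldl, ih]

theorem a_closed (current : List String) :
    get_new_map current =
      current ++ ["?"] ++ current ++ ["?"] ++ current ++ ["?"] ++
      current ++ ["?"] ++ current ++ ["?"] ++ current := by
  unfold get_new_map
  rw [show PySem.List.pyRange 0 6 1 = [0, 1, 2, 3, 4, 5] from by decide]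
  simp only [List.foldl, inner_loop_eq]
  norm_num

-- the mod-selector function of port B, as a named helper for the lemmas
def pvSel (current : List String) (p : Int) : String :=
  if PySem.Int.mod p ((current.length : Int) + 1) = (current.length : Int) then "?"
  else PySem.List.pyGetD current (PySem.Int.mod p ((current.length : Int) + 1)) ""

theorem pvSel_val (current : List String) (a k : Int)
    (hdvd : ((current.length : Int) + 1) ∣ a) (h0 : 0 ≤ k) (h1 : k ≤ (current.length : Int)) :
    pvSel current (a + k) =
      (if k = (current.length : Int) then "?" else PySem.List.pyGetD current k "") := by
  have hpos : (0:Int) < (current.length : Int) + 1 := by positivity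
  have hmod : (a + k) % ((current.length : Int) + 1) = k := by
    obtain ⟨c, rfl⟩ := hdvd
    have hcomm : ((current.length : Int) + 1) * c + k = k + ((current.length : Int) + 1) * c := by
      ring
    rw [hcomm, Int.add_mul_emod_self_left]
    exact Int.emod_eq_of_lt h0 (by omega)
  simp [pvSel, hmod]

theorem map_getD_range (xs : List String) :
    (List.range xs.length).map (fun k => xs.getD k "") = xs := by
  induction xs with
  | nil => simp
  | cons x xs ih =>
    rw [List.length_cons, List.range_succ_eq_map, List.map_cons, List.map_map]
    simpa [Function.comp_def] using ih

-- a segment [a, a+n) with (n+1) ∣ a maps under pvSel to current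
theorem body_map (current : List String) (a b : Int)
    (hdvd : ((current.length : Int) + 1) ∣ a) (hb : b = a + (current.length : Int)) :
    (PySem.List.pyRange a b 1).map (pvSel current) = current := by
  subst hb
  rw [PySem.List.pyRange_one a (a + (current.length : Int)), List.map_map]
  have hlen : ((a + (current.length : Int) - a).toNat) = current.length := by omega
  rw [hlen]
  have hcong : ∀ k ∈ List.range current.length,
      (pvSel current ∘ fun (k : Nat) => a + (k : Int)) k = current.getD k "" := by
    intro k hk
    simp only [List.mem_range] at hk
    have hklt : (k : Int) < (current.length : Int) := by exact_mod_cast hk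
    simp only [Function.comp_apply]
    rw [pvSel_val current a _ hdvd (by positivity) (le_of_lt hklt)]
    simp [ne_of_lt hklt]
  rw [List.map_congr_left hcong, map_getD_range]

-- a block [a, a+n+1) with (n+1) ∣ a maps under pvSel to current ++ ["?"]
theorem block_map (current : List String) (a b : Int)
    (hdvd : ((current.length : Int) + 1) ∣ a) (hb : b = a + (current.length : Int) + 1) :
    (PySem.List.pyRange a b 1).map (pvSel current) = current ++ ["?"] := by
  subst hb
  have hsplit : PySem.List.pyRange a (a + (current.length : Int) + 1) 1
      = PySem.List.pyRange a (a + (current.length : Int)) 1 ++ [a + (current.length : Int)] := by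
    simpa using PySem.List.pyRange_one_succ_right (a := a) (b := a + (current.length : Int))
      (by have : (0:Int) ≤ (current.length : Int) := Int.natCast_nonneg _; omega)
  have htail : pvSel current (a + (current.length : Int)) = "?" := by
    rw [pvSel_val current a _ hdvd (Int.natCast_nonneg _) le_rfl]; simp
  rw [hsplit, List.map_append, body_map current a _ hdvd rfl]
  simp [htail]

theorem b_closed (current : List String) :
    get_new_map_alt current =
      current ++ ["?"] ++ current ++ ["?"] ++ current ++ ["?"] ++
      current ++ ["?"] ++ current ++ ["?"] ++ current := by
  unfold get_new_map_alt
  show (PySem.List.pyRange 0 (6 * (current.length : Int) + 5) 1).map (pvSel current) = _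
  have hn : (0:Int) ≤ (current.length : Int) := Int.natCast_nonneg _
  set n : Int := (current.length : Int) with hn_def
  have hsplit : PySem.List.pyRange 0 (6 * n + 5) 1
      = PySem.List.pyRange 0 (n + 1) 1 ++ PySem.List.pyRange (n + 1) (2 * n + 2) 1
        ++ PySem.List.pyRange (2 * n + 2) (3 * n + 3) 1
        ++ PySem.List.pyRange (3 * n + 3) (4 * n + 4) 1
        ++ PySem.List.pyRange (4 * n + 4) (5 * n + 5) 1
        ++ PySem.List.pyRange (5 * n + 5) (6 * n + 5) 1 := by
    rw [PySem.List.pyRange_one_append 0 (n + 1) (6 * n + 5) (by omega) (by omega),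
        PySem.List.pyRange_one_append (n + 1) (2 * n + 2) (6 * n + 5) (by omega) (by omega),
        PySem.List.pyRange_one_append (2 * n + 2) (3 * n + 3) (6 * n + 5) (by omega) (by omega),
        PySem.List.pyRange_one_append (3 * n + 3) (4 * n + 4) (6 * n + 5) (by omega) (by omega),
        PySem.List.pyRange_one_append (4 * n + 4) (5 * n + 5) (6 * n + 5) (by omega) (by omega)]
    simp [List.append_assoc]
  rw [hsplit]
  simp only [List.map_append]
  rw [block_map current 0 (n + 1) ⟨0, by ring⟩ (by omega),
      block_map current (n + 1) (2 * n + 2) ⟨1, by ring⟩ (by omega),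
      block_map current (2 * n + 2) (3 * n + 3) ⟨2, by ring⟩ (by omega),
      block_map current (3 * n + 3) (4 * n + 4) ⟨3, by ring⟩ (by omega),
      block_map current (4 * n + 4) (5 * n + 5) ⟨4, by ring⟩ (by omega),
      body_map current (5 * n + 5) (6 * n + 5) ⟨5, by ring⟩ (by omega)]
  simp [List.append_assoc]

-- ===== VERDICT (by name: the statement is the Claim_ definition above) =====
theorem get_new_map_spec : Claim_equal_get_new_map := by
  intro current _
  unfold Spec_get_new_map
  rw [a_closed, b_closed]
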